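-- pv_equiv track=rewrite | github.com/thomasroodnl/reference-error-detection | error_detection/coref_chain_detector.py | check_chain_link_oneway
-- ===== SOURCE A (Python) =====
-- def check_chain_link_oneway(chain_ids, other_chain_ids):
--     """
--     Check whether one list of chain ids is inconsistent with respect to the other
--     :param chain_ids: base chain id list
--     :param other_chain_ids: chain id list to detect inconsistencies from
--     :return: indices that where inconsistent
--     :rtype: list (of str)
--
--     NOTE: returned indices depend on list order (first encountered entity is accepted as truth)
--     """
--     chain_id_map = {}
--     error_indices = []
--     for i in range(len(chain_ids)):
--         if chain_ids[i] is not None and other_chain_ids[i] is not None: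
--             if not chain_ids[i] in chain_id_map.keys():
--                 # Initial chain ID link
--                 chain_id_map[chain_ids[i]] = other_chain_ids[i]
--             else:
--                 # Test if established chain ID link persists
--                 if chain_id_map[chain_ids[i]] != other_chain_ids[i]:
--                     error_indices.append(i)
--     return error_indices
-- ===== SOURCE B (Python) =====
-- def check_chain_link_oneway(chain_ids, other_chain_ids):
--     """Map-free re-implementation: for each usable index i, scan the prefix for
--     the first index carrying the same chain id; that occurrence is the accepted
--     truth, and i is an error when its other-id disagrees with it."""
--     def first_link(i):
--         # first j <= i with a usable pair sharing chain_ids[i]'s id (j = i at worst)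
--         for j in range(i + 1):
--             if chain_ids[j] is not None and other_chain_ids[j] is not None \
--                     and chain_ids[j] == chain_ids[i]:
--                 return j
--     error_indices = []
--     for i in range(len(chain_ids)):
--         if chain_ids[i] is not None and other_chain_ids[i] is not None:
--             j = first_link(i)
--             if j != i and other_chain_ids[j] != other_chain_ids[i]:
--                 error_indices.append(i)
--     return error_indices
-- ===== Notes on version B (the rewrite author's own statement) =====
-- stated objective: alternative
-- what changed: Replaces A's dict-building single pass with a map-free nested scan: for each usable index, the prefix is searched for the first occurrence of the same chain id and the index is an error when its other-id disagrees with that first occurrence.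
import Mathlib
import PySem

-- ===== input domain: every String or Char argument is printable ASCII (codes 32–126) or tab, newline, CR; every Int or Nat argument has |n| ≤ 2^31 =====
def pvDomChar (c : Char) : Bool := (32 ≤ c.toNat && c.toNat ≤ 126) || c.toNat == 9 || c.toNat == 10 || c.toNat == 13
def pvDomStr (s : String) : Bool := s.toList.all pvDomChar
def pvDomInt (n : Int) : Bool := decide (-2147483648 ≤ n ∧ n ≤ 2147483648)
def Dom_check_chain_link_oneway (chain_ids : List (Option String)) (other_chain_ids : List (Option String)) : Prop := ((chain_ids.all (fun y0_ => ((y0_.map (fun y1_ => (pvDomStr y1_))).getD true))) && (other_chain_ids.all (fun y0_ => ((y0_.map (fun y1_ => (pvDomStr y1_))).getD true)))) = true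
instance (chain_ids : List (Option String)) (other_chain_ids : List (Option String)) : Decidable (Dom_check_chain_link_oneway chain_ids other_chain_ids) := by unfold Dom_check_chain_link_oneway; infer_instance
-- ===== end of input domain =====

-- B replaces A's first-seen dict with a map-free nested scan over the prefix (alternative decomposition, not faster).

-- ===== PORT A =====
-- A: single pass keeping a dict chain_id -> first other id; an index is an error when the
-- stored link disagrees.  (pyGetD's default branch is only reached on inputs Pre_ excludes,
-- where Python raises IndexError.)
def check_chain_link_oneway (chain_ids : List (Option String)) (other_chain_ids : List (Option String)) : List Int :=
  ((PySem.List.pyRange 0 (chain_ids.length : Int) 1).foldl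
    (fun (st : PySem.Dict String String × List Int) i =>
      match PySem.List.pyGetD chain_ids i none, PySem.List.pyGetD other_chain_ids i none with
      | some c, some o =>
          if st.1.contains c = false then (st.1.insert c o, st.2)
          else if st.1.get? c ≠ some o then (st.1, st.2 ++ [i]) else st
      | _, _ => st)
    (PySem.Dict.empty, [])).2

-- ===== PORT B =====
-- B: for each usable index i, scan the prefix for the first usable index j carrying the
-- same chain id; i is an error when j ≠ i and the other-ids disagree.
def check_chain_link_oneway_alt (chain_ids : List (Option String)) (other_chain_ids : List (Option String)) : List Int :=
  (List.range chain_ids.length).foldl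
    (fun (errs : List Int) i =>
      match chain_ids.getD i none with
      | none => errs
      | some c =>
        match other_chain_ids.getD i none with
        | none => errs
        | some o =>
          match (List.range (i+1)).find? (fun j =>
              decide (chain_ids.getD j none ≠ none ∧ other_chain_ids.getD j none ≠ none ∧
                      chain_ids.getD j none = some c)) with
          | some j => if j ≠ i ∧ other_chain_ids.getD j none ≠ some o then errs ++ [(i : Int)] else errs
          | none => errs) []

-- ===== PRECONDITION & SPEC =====
-- Pre_ excludes exactly the inputs where Python A raises IndexError: some index with a
-- non-None chain id but no corresponding entry in other_chain_ids.
def Pre_check_chain_link_oneway (chain_ids : List (Option String)) (other_chain_ids : List (Option String)) : Prop :=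
  ∀ i : Nat, i < chain_ids.length → chain_ids.getD i none ≠ none → i < other_chain_ids.length
instance (chain_ids : List (Option String)) (other_chain_ids : List (Option String)) : Decidable (Pre_check_chain_link_oneway chain_ids other_chain_ids) := by unfold Pre_check_chain_link_oneway; infer_instance
def pvWitness_check_chain_link_oneway : List (Option String) × List (Option String) :=
  ([some "a", none, some "a"], [some "x", some "y", some "z"])

def Spec_check_chain_link_oneway (chain_ids : List (Option String)) (other_chain_ids : List (Option String)) (out : List Int) : Prop := out = check_chain_link_oneway_alt chain_ids other_chain_ids
instance (chain_ids : List (Option String)) (other_chain_ids : List (Option String)) (out : List Int) : Decidable (Spec_check_chain_link_oneway chain_ids other_chain_ids out) := by unfold Spec_check_chain_link_oneway; infer_instance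

-- ===== CLAIM (what is proved, stated in full; the proofs are below) =====
def Claim_equal_check_chain_link_oneway : Prop := ∀ (chain_ids : List (Option String)) (other_chain_ids : List (Option String)), Dom_check_chain_link_oneway chain_ids other_chain_ids → Pre_check_chain_link_oneway chain_ids other_chain_ids → Spec_check_chain_link_oneway chain_ids other_chain_ids (check_chain_link_oneway chain_ids other_chain_ids)

-- ===== LEMMAS AND PROOFS =====

-- One step of A's loop (index already a Nat).
def pvStepA (cs os : List (Option String)) (st : PySem.Dict String String × List Int) (k : Nat) :
    PySem.Dict String String × List Int :=
  match cs.getD k none, os.getD k none with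
  | some c, some o =>
      if st.1.contains c = false then (st.1.insert c o, st.2)
      else if st.1.get? c ≠ some o then (st.1, st.2 ++ [(k : Int)]) else st
  | _, _ => st

-- One step of B's loop.
def pvStepB (cs os : List (Option String)) (errs : List Int) (i : Nat) : List Int :=
  match cs.getD i none with
  | none => errs
  | some c =>
    match os.getD i none with
    | none => errs
    | some o =>
      match (List.range (i+1)).find? (fun j =>
          decide (cs.getD j none ≠ none ∧ os.getD j none ≠ none ∧ cs.getD j none = some c)) with
      | some j => if j ≠ i ∧ os.getD j none ≠ some o then errs ++ [(i : Int)] else errs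
      | none => errs

-- B's scan predicate.
def pvLink (cs os : List (Option String)) (c : String) : Nat → Bool := fun j =>
  decide (cs.getD j none ≠ none ∧ os.getD j none ≠ none ∧ cs.getD j none = some c)

def pvStA (cs os : List (Option String)) (n : Nat) : PySem.Dict String String × List Int :=
  (List.range n).foldl (pvStepA cs os) (PySem.Dict.empty, [])

def pvEB (cs os : List (Option String)) (n : Nat) : List Int :=
  (List.range n).foldl (pvStepB cs os) []

lemma pvA_eq_stA (cs os : List (Option String)) :
    check_chain_link_oneway cs os = (pvStA cs os cs.length).2 := by
  have h : PySem.List.pyRange 0 (cs.length : Int) 1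
      = List.map (fun k : Nat => (k : Int)) (List.range cs.length) := by
    rw [PySem.List.pyRange_one]
    rw [show ((cs.length:Int)-0).toNat = cs.length by simp]
    exact List.map_congr_left (fun k _ => by omega)
  unfold check_chain_link_oneway pvStA
  rw [h, List.foldl_map]
  refine congrArg Prod.snd (PySem.List.foldl_congr_mem _ _ _ _ ?_)
  intro acc x hx
  simp [pvStepA, PySem.List.pyGetD_natCast]

lemma pvB_eq_eB (cs os : List (Option String)) :
    check_chain_link_oneway_alt cs os = pvEB cs os cs.length := rfl

lemma pvFind_singleton (p : Nat → Bool) (n : Nat) :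
    [n].find? p = if p n then some n else none := by
  cases h : p n <;> simp [List.find?, h]

lemma pvStepA_none1 (cs os : List (Option String)) (st : PySem.Dict String String × List Int)
    (k : Nat) (hc : cs.getD k none = none) : pvStepA cs os st k = st := by
  unfold pvStepA; rw [hc]

lemma pvStepA_none2 (cs os : List (Option String)) (st : PySem.Dict String String × List Int)
    (k : Nat) (c : String) (hc : cs.getD k none = some c) (ho : os.getD k none = none) :
    pvStepA cs os st k = st := by
  unfold pvStepA; rw [hc, ho]

lemma pvStepA_some (cs os : List (Option String)) (st : PySem.Dict String String × List Int)
    (k : Nat) (c o : String) (hc : cs.getD k none = some c) (ho : os.getD k none = some o) :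
    pvStepA cs os st k =
      if st.1.contains c = false then (st.1.insert c o, st.2)
      else if st.1.get? c ≠ some o then (st.1, st.2 ++ [(k : Int)]) else st := by
  unfold pvStepA; rw [hc, ho]

lemma pvStepB_none1 (cs os : List (Option String)) (errs : List Int)
    (k : Nat) (hc : cs.getD k none = none) : pvStepB cs os errs k = errs := by
  unfold pvStepB; rw [hc]

lemma pvStepB_none2 (cs os : List (Option String)) (errs : List Int)
    (k : Nat) (c : String) (hc : cs.getD k none = some c) (ho : os.getD k none = none) :
    pvStepB cs os errs k = errs := by
  unfold pvStepB; rw [hc, ho]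

lemma pvStepB_some (cs os : List (Option String)) (errs : List Int)
    (k : Nat) (c o : String) (hc : cs.getD k none = some c) (ho : os.getD k none = some o) :
    pvStepB cs os errs k =
      match (List.range (k+1)).find? (pvLink cs os c) with
      | some j => if j ≠ k ∧ os.getD j none ≠ some o then errs ++ [(k : Int)] else errs
      | none => errs := by
  unfold pvStepB pvLink; rw [hc, ho]

lemma pvInv (cs os : List (Option String)) (n : Nat) :
    (∀ c, (pvStA cs os n).1.get? c =
        ((List.range n).find? (pvLink cs os c)).bind (fun j => os.getD j none))
    ∧ (pvStA cs os n).2 = pvEB cs os n := by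
  induction n with
  | zero =>
      exact ⟨fun c => by simp [pvStA, PySem.Dict.get?_empty], rfl⟩
  | succ n ih =>
      obtain ⟨ih1, ih2⟩ := ih
      have hA : pvStA cs os (n+1) = pvStepA cs os (pvStA cs os n) n := by
        unfold pvStA; rw [List.range_succ, List.foldl_append]; rfl
      have hB : pvEB cs os (n+1) = pvStepB cs os (pvEB cs os n) n := by
        unfold pvEB; rw [List.range_succ, List.foldl_append]; rfl
      have hfind : ∀ c, (List.range (n+1)).find? (pvLink cs os c)
          = ((List.range n).find? (pvLink cs os c)).or
              (if pvLink cs os c n then some n else none) := by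
        intro c
        rw [List.range_succ, List.find?_append, pvFind_singleton]
      rw [hA, hB]
      cases hc : cs.getD n none with
      | none =>
          have hl : ∀ c, pvLink cs os c n = false := by
            intro c; simp only [pvLink]; rw [hc]; simp
          rw [pvStepA_none1 cs os _ n hc, pvStepB_none1 cs os _ n hc]
          refine ⟨fun c => ?_, ih2⟩
          rw [ih1 c, hfind c, hl c]
          simp
      | some c0 =>
          cases ho : os.getD n none with
          | none =>
              have hl : ∀ c, pvLink cs os c n = false := by
                intro c; simp only [pvLink]; rw [hc, ho]; simp
              rw [pvStepA_none2 cs os _ n c0 hc ho, pvStepB_none2 cs os _ n c0 hc ho]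
              refine ⟨fun c => ?_, ih2⟩
              rw [ih1 c, hfind c, hl c]
              simp
          | some o0 =>
              have hlself : pvLink cs os c0 n = true := by
                simp only [pvLink]; rw [hc, ho]; simp
              have hlne : ∀ c, c ≠ c0 → pvLink cs os c n = false := by
                intro c hne
                simp only [pvLink]; rw [hc, ho]
                simp only [decide_eq_false_iff_not]
                rintro ⟨-, -, h⟩
                exact hne (Option.some.inj h).symm
              rw [pvStepA_some cs os _ n c0 o0 hc ho, pvStepB_some cs os _ n c0 o0 hc ho]
              cases h1 : (List.range n).find? (pvLink cs os c0) with
              | none =>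
                  -- first occurrence of c0 is index n: A inserts, B finds j = n
                  have hget : (pvStA cs os n).1.get? c0 = none := by
                    rw [ih1 c0, h1]; rfl
                  have hcont : (pvStA cs os n).1.contains c0 = false := by
                    rw [PySem.Dict.contains_eq_isSome_get?, hget]; rfl
                  have hfn : (List.range (n+1)).find? (pvLink cs os c0) = some n := by
                    rw [hfind c0, h1, hlself]; rfl
                  rw [hcont, hfn, if_pos rfl]
                  constructor
                  · intro c
                    show ((pvStA cs os n).1.insert c0 o0).get? c = _
                    by_cases hcc : c = c0
                    · subst hcc
                      rw [PySem.Dict.get?_insert_self, hfn]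
                      simp only [Option.bind_some, ho]
                    · rw [PySem.Dict.get?_insert_of_ne _ _ hcc, ih1 c, hfind c, hlne c hcc]
                      simp
                  · show (pvStA cs os n).2 = _
                    simp [ih2]
              | some j =>
                  have hpj : pvLink cs os c0 j = true := List.find?_some h1
                  have hjn : j < n := List.mem_range.mp (List.mem_of_find?_eq_some h1)
                  have hosj : os.getD j none ≠ none := (of_decide_eq_true hpj).2.1
                  obtain ⟨v, hv⟩ := Option.ne_none_iff_exists'.mp hosj
                  have hget : (pvStA cs os n).1.get? c0 = some v := by
                    rw [ih1 c0, h1]; simpa using hv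
                  have hcont : (pvStA cs os n).1.contains c0 = true := by
                    rw [PySem.Dict.contains_eq_isSome_get?, hget]; rfl
                  have hfn : (List.range (n+1)).find? (pvLink cs os c0) = some j := by
                    rw [hfind c0, h1]; simp
                  have hjne : j ≠ n := Nat.ne_of_lt hjn
                  rw [hcont, hfn, hget, if_neg (by simp)]
                  constructor
                  · intro c
                    have hfst : (if some v ≠ some o0 then ((pvStA cs os n).1, (pvStA cs os n).2 ++ [(n : Int)])
                        else pvStA cs os n).1 = (pvStA cs os n).1 := by
                      by_cases hvo : v = o0 <;> simp [hvo]
                    rw [hfst, ih1 c, hfind c]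
                    by_cases hcc : c = c0
                    · subst hcc; rw [h1]; simp
                    · rw [hlne c hcc]; simp
                  · show (if some v ≠ some o0 then ((pvStA cs os n).1, (pvStA cs os n).2 ++ [(n : Int)])
                        else pvStA cs os n).2 = (if j ≠ n ∧ os.getD j none ≠ some o0
                          then pvEB cs os n ++ [(n : Int)] else pvEB cs os n)
                    rw [hv]
                    by_cases hvo : v = o0
                    · subst hvo
                      simp [hjne, ih2]
                    · have hne : some v ≠ some o0 := fun h => hvo (Option.some.inj h)
                      simp [hjne, hne, ih2]

-- ===== VERDICT (by name: the statement is the Claim_ definition above) =====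
theorem check_chain_link_oneway_spec : Claim_equal_check_chain_link_oneway := by
  intro cs os _ _
  show _ = _
  rw [pvA_eq_stA, pvB_eq_eB, (pvInv cs os cs.length).2]
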